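-- pv_equiv track=rewrite | github.com/Lautiim/ayed1-2025-tps | TP3/Ejercicio_04.py | dia_mas_productivo
-- ===== SOURCE A (Python) =====
-- def dia_mas_productivo(matriz: list[list[int]]) -> tuple[int, int]:
--     """Determina el día más productivo considerando todas las fábricas combinadas.
--
--     Pre: Recibe una matriz de enteros.
--
--     Post: Devuelve una tupla con el índice del día y la cantidad total producida.
--     """
--     assert len(matriz) > 0, "La matriz no debe estar vacía."
--
--     dias = len(matriz[0]) # Número de días
--     max_dia = -1 # Índice del día más productivo
--     max_produccion = -1 # Cantidad máxima producida en un día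
--
--     for j in range(dias): # Recorremos cada día
--         produccion_dia = sum(matriz[i][j] for i in range(len(matriz))) # Sumamos la producción de todas las fábricas en ese día
--         if produccion_dia > max_produccion: # Si la producción del día es mayor a la máxima registrada
--             max_produccion = produccion_dia # Actualizamos la máxima producción
--             max_dia = j # Actualizamos el día
--
--     return (max_dia, max_produccion)
-- ===== SOURCE B (Python) =====
-- def dia_mas_productivo(matriz: list[list[int]]) -> tuple[int, int]:
--     """Totals-table first, then a separate argmax pass (instead of A's
--     per-day inner sum over all factories)."""
--     assert len(matriz) > 0, "La matriz no debe estar vacía."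
--
--     totales = [0] * len(matriz[0])
--     for fila in matriz:
--         totales = [t + x for t, x in zip(totales, fila)]
--
--     max_dia = -1
--     max_produccion = -1
--     for j, total in enumerate(totales):
--         if total > max_produccion:
--             max_produccion = total
--             max_dia = j
--
--     return (max_dia, max_produccion)
-- ===== Notes on version B (the rewrite author's own statement) =====
-- stated objective: alternative
-- what changed: B accumulates a per-day totals list row by row (zip-add) and then runs a separate argmax pass over it, instead of A's per-day loop that re-scans every factory row with an inner sum.
import Mathlib
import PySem

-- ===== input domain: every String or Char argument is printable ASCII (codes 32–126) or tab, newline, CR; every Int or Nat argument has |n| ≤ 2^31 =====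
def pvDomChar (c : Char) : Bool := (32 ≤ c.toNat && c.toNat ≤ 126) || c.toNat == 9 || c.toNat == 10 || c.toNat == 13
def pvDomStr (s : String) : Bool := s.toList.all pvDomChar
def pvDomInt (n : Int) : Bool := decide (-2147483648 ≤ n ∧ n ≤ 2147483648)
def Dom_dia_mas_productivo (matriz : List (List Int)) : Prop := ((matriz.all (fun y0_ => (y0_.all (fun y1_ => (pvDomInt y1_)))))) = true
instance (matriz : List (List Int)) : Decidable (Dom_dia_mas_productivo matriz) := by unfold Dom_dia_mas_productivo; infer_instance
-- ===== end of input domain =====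

-- B builds the per-day totals list row by row and then does a separate argmax pass;
-- A computes each day's total with an inner scan over all rows inside the argmax loop.

-- ===== PORT A =====
-- for j in range(dias): produccion_dia = sum(matriz[i][j] ...); strict > keeps the first max.
-- matriz[i][j] is ported with pyGetD; exact under Pre_ (every row has ≥ dias entries).
def dia_mas_productivo (matriz : List (List Int)) : Int × Int :=
  let dias := (matriz.headD []).length
  (List.range dias).foldl
    (fun (st : Int × Int) (j : Nat) =>
      let produccion_dia := matriz.foldl (fun s fila => s + PySem.List.pyGetD fila (j : Int) 0) 0
      if produccion_dia > st.2 then ((j : Int), produccion_dia) else st)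
    (-1, -1)

-- ===== PORT B =====
-- totales = [t + x for t, x in zip(totales, fila)] per row, then enumerate-argmax.
def dia_mas_productivo_alt (matriz : List (List Int)) : Int × Int :=
  let dias := (matriz.headD []).length
  let totales := matriz.foldl (fun tot fila => List.zipWith (· + ·) tot fila) (List.replicate dias 0)
  (PySem.List.enumerate totales 0).foldl
    (fun (st : Int × Int) p => if p.2 > st.2 then (p.1, p.2) else st)
    (-1, -1)

-- ===== PRECONDITION & SPEC =====
-- A asserts the matrix is non-empty, and raises IndexError when some row is shorter
-- than the first row (the days it iterates over); Pre_ excludes exactly those inputs.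
def Pre_dia_mas_productivo (matriz : List (List Int)) : Prop :=
  matriz ≠ [] ∧ ∀ fila ∈ matriz, (matriz.headD []).length ≤ fila.length
instance (matriz : List (List Int)) : Decidable (Pre_dia_mas_productivo matriz) := by
  unfold Pre_dia_mas_productivo; infer_instance

def pvWitness_dia_mas_productivo : List (List Int) := [[1, 5, 2], [3, 0, 4]]

def Spec_dia_mas_productivo (matriz : List (List Int)) (out : Int × Int) : Prop := out = dia_mas_productivo_alt matriz
instance (matriz : List (List Int)) (out : Int × Int) : Decidable (Spec_dia_mas_productivo matriz out) := by unfold Spec_dia_mas_productivo; infer_instance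

-- ===== CLAIM (what is proved, stated in full; the proofs are below) =====
def Claim_equal_dia_mas_productivo : Prop := ∀ (matriz : List (List Int)), Dom_dia_mas_productivo matriz → Pre_dia_mas_productivo matriz → Spec_dia_mas_productivo matriz (dia_mas_productivo matriz)

-- ===== LEMMAS AND PROOFS =====

-- column sum of the rows, the value both programs accumulate for day j
def colSum (rows : List (List Int)) (j : Nat) : Int :=
  (rows.map (fun fila => PySem.List.pyGetD fila (j : Int) 0)).sum

-- one zip-add step on a list presented as a map over range
theorem zipWith_add_map_range (dias : Nat) (f : Nat → Int) (fila : List Int)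
    (h : dias ≤ fila.length) :
    List.zipWith (· + ·) ((List.range dias).map f) fila
      = (List.range dias).map (fun j => f j + PySem.List.pyGetD fila (j : Int) 0) := by
  apply List.ext_getElem
  · simp [List.length_zipWith]; omega
  · intro i h1 h2
    have hi : i < dias := by simpa using h2
    have hif : i < fila.length := lt_of_lt_of_le hi h
    simp [List.getElem_zipWith, PySem.List.pyGetD_natCast, List.getD_eq_getElem?_getD,
      List.getElem?_eq_getElem hif]

-- the totals loop keeps the list equal to the column sums of the rows seen so far
theorem totales_invariant (rows : List (List Int)) (dias : Nat) (f : Nat → Int)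
    (h : ∀ fila ∈ rows, dias ≤ fila.length) :
    rows.foldl (fun tot fila => List.zipWith (· + ·) tot fila) ((List.range dias).map f)
      = (List.range dias).map (fun j => f j + colSum rows j) := by
  induction rows generalizing f with
  | nil => simp [colSum]
  | cons fila rows ih =>
    have hf : dias ≤ fila.length := h fila (by simp)
    simp only [List.foldl_cons, zipWith_add_map_range dias f fila hf]
    rw [ih _ (fun r hr => h r (by simp [hr]))]
    apply List.map_congr_left
    intro j _
    simp [colSum, add_assoc]

-- enumerate of a map over range is the range tagged with its own indices
theorem enumerate_map_range (g : Nat → Int) (n : Nat) :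
    PySem.List.enumerate ((List.range n).map g) 0
      = (List.range n).map (fun (j : Nat) => ((j : Int), g j)) := by
  induction n with
  | zero => simp
  | succ n ih =>
    rw [List.range_succ, List.map_append, List.map_append,
      PySem.List.enumerate_append, ih]
    simp [PySem.List.enumerate_cons, PySem.List.enumerate_nil]

-- ===== VERDICT (by name: the statement is the Claim_ definition above) =====
theorem dia_mas_productivo_spec : Claim_equal_dia_mas_productivo := by
  intro matriz _ hpre
  unfold Spec_dia_mas_productivo dia_mas_productivo dia_mas_productivo_alt
  simp only []
  have hrep : List.replicate (matriz.headD []).length (0 : Int)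
      = (List.range (matriz.headD []).length).map (fun _ => (0 : Int)) := by
    simp [List.map_const']
  rw [hrep, totales_invariant matriz (matriz.headD []).length (fun _ => 0) hpre.2]
  simp only [zero_add]
  rw [enumerate_map_range (fun j => colSum matriz j) (matriz.headD []).length,
    List.foldl_map]
  apply PySem.List.foldl_congr_mem
  intro st j _
  have : matriz.foldl (fun s fila => s + PySem.List.pyGetD fila (j : Int) 0) 0
      = colSum matriz j := by
    simpa [colSum] using
      PySem.List.foldl_add (l := matriz) (a := 0)
        (g := fun fila => PySem.List.pyGetD fila (j : Int) 0)
  rw [this]
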